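-- pv_equiv track=rewrite | github.com/JAGAN666/nlx-labor-market-intelligence | 3_recommend.py | find_closest_skill
-- ===== SOURCE A (Python) =====
-- def find_closest_skill(query: str, skill_to_idx: dict) -> str | None:
--     """Fuzzy match: find the closest skill name in our index."""
--     query = query.lower().strip()
--     # Exact match
--     for skill in skill_to_idx:
--         if skill.lower() == query:
--             return skill
--     # Partial match
--     candidates = [s for s in skill_to_idx if query in s.lower() or s.lower() in query]
--     if candidates:
--         return candidates[0]
--     return None
-- ===== SOURCE B (Python) =====
-- def find_closest_skill(query: str, skill_to_idx: dict) -> str | None: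
--     """Single pass: return on exact match immediately, remember first partial."""
--     query = query.lower().strip()
--     first_partial = None
--     for skill in skill_to_idx:
--         s = skill.lower()
--         if s == query:
--             return skill
--         if first_partial is None and (query in s or s in query):
--             first_partial = skill
--     return first_partial
-- ===== Notes on version B (the rewrite author's own statement) =====
-- stated objective: faster
-- what changed: Replaces A's two scans (exact-match loop, then a filtering pass that tests every key for a partial match) by a single loop that returns on an exact hit and remembers only the first partial match, so substring tests stop after the first partial candidate instead of being run on every key.
import Mathlib
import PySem

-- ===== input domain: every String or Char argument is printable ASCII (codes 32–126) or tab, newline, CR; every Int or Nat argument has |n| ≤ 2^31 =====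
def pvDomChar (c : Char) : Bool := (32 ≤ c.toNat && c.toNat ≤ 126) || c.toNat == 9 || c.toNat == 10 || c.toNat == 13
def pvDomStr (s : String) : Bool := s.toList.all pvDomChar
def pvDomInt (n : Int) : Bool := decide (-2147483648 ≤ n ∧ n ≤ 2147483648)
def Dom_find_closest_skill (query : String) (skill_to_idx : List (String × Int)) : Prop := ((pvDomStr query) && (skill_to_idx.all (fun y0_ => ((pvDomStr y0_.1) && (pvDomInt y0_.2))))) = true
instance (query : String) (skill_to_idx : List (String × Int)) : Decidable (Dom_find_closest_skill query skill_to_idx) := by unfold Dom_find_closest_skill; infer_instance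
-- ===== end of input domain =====

-- B fuses A's two scans (exact-match loop, then partial-match filter) into one pass
-- that returns on an exact hit and remembers the first partial match (objective: faster, measured).


-- ===== PORT A =====
-- the exact-match loop: first key whose lower() equals q
def pvExactScan (q : String) : List (String × Int) → Option String
  | [] => none
  | (skill, _) :: rest =>
      if PySem.Str.lower skill == q then some skill else pvExactScan q rest

-- the partial-match predicate 'query in s.lower() or s.lower() in query'
def pvPartialPred (q s : String) : Bool :=
  PySem.Str.isIn q (PySem.Str.lower s) || PySem.Str.isIn (PySem.Str.lower s) q

def find_closest_skill (query : String) (skill_to_idx : List (String × Int)) : Option String :=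
  let q := PySem.Str.strip (PySem.Str.lower query)
  match pvExactScan q skill_to_idx with
  | some skill => some skill
  | none =>
      let candidates := (skill_to_idx.map Prod.fst).filter (fun s => pvPartialPred q s)
      match candidates with
      | c :: _ => some c
      | [] => none

-- ===== PORT B =====
-- single pass: return on exact hit, remember first partial in the accumulator
def pvScan (q : String) (first_partial : Option String) : List (String × Int) → Option String
  | [] => first_partial
  | (skill, _) :: rest =>
      let s := PySem.Str.lower skill
      if s == q then some skill
      else if first_partial.isNone &&
              (PySem.Str.isIn q s || PySem.Str.isIn s q) then
        pvScan q (some skill) rest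
      else
        pvScan q first_partial rest

def find_closest_skill_alt (query : String) (skill_to_idx : List (String × Int)) : Option String :=
  pvScan (PySem.Str.strip (PySem.Str.lower query)) none skill_to_idx

-- ===== PRECONDITION & SPEC =====
def Spec_find_closest_skill (query : String) (skill_to_idx : List (String × Int)) (out : Option String) : Prop := out = find_closest_skill_alt query skill_to_idx
instance (query : String) (skill_to_idx : List (String × Int)) (out : Option String) : Decidable (Spec_find_closest_skill query skill_to_idx out) := by unfold Spec_find_closest_skill; infer_instance

-- ===== CLAIM (what is proved, stated in full; the proofs are below) =====
def Claim_equal_find_closest_skill : Prop := ∀ (query : String) (skill_to_idx : List (String × Int)), Dom_find_closest_skill query skill_to_idx → Spec_find_closest_skill query skill_to_idx (find_closest_skill query skill_to_idx)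

-- ===== LEMMAS AND PROOFS =====

-- the single pass equals: exact scan first, else the accumulator, else the first filtered partial
theorem pvScan_eq (q : String) (l : List (String × Int)) (acc : Option String) :
    pvScan q acc l =
      match pvExactScan q l with
      | some s => some s
      | none =>
          match acc with
          | some a => some a
          | none =>
              match (l.map Prod.fst).filter (fun s => pvPartialPred q s) with
              | c :: _ => some c
              | [] => none := by
  induction l generalizing acc with
  | nil => cases acc <;> rfl
  | cons p rest ih =>
      obtain ⟨skill, v⟩ := p
      by_cases hx : PySem.Str.lower skill == q
      · simp [pvScan, pvExactScan, hx]
      · cases acc with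
        | some a =>
            simp [pvScan, pvExactScan, hx, ih]
        | none =>
            by_cases hp : pvPartialPred q skill
            · have hc : (PySem.Chars.isIn q.toList (PySem.Chars.lower skill.toList) ||
                  PySem.Chars.isIn (PySem.Chars.lower skill.toList) q.toList) = true := by
                simpa [pvPartialPred] using hp
              simp only [Bool.or_eq_true] at hc
              simp [pvScan, pvExactScan, hx, ih, pvPartialPred, hc]
            · have hc : (PySem.Chars.isIn q.toList (PySem.Chars.lower skill.toList) ||
                  PySem.Chars.isIn (PySem.Chars.lower skill.toList) q.toList) = false := by
                simpa [pvPartialPred] using hp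
              simp only [Bool.or_eq_false_iff] at hc
              simp [pvScan, pvExactScan, hx, ih, pvPartialPred, hc.1, hc.2]

-- ===== VERDICT (by name: the statement is the Claim_ definition above) =====
theorem find_closest_skill_spec : Claim_equal_find_closest_skill := by
  intro query skill_to_idx _
  unfold Spec_find_closest_skill find_closest_skill find_closest_skill_alt
  rw [pvScan_eq]
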